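-- pv_equiv track=rewrite | github.com/ghzggggg/ghz | 简单的整数划分问题.py | int_map
-- ===== SOURCE A (Python) =====
-- def int_map(a=50):
--     array = [[1]*a] + [[0]*a for _ in range(a-1)]
--     for i in range(1,a):
--         for j in range(1,i):
--             for k in range(min(i-j,j+1)):
--                 array[j][i] += array[k][i-j-1]
--         array[i][i] = 1
--     return array
-- ===== SOURCE B (Python) =====
-- def int_map(a=50):
--     # Same table, but each cell is a single prefix-sum lookup instead of an
--     # inner accumulation loop: O(a^2) instead of O(a^3).
--     array = [[1]*a] + [[0]*a for _ in range(a-1)]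
--     prefix = []  # prefix[c][t] = sum(array[k][c] for k in range(t)) for finished columns c
--     for i in range(a):
--         if i >= 1:
--             for j in range(1, i):
--                 array[j][i] = prefix[i-j-1][min(i-j, j+1)]
--             array[i][i] = 1
--         p = [0]
--         for k in range(a):
--             p.append(p[-1] + array[k][i])
--         prefix.append(p)
--     return array
-- ===== Notes on version B (the rewrite author's own statement) =====
-- stated objective: faster
-- what changed: The inner accumulation loop over k is replaced by a single lookup into per-column prefix-sum arrays built once per column, an O(a^2) table fill instead of A's O(a^3) triple loop.
import Mathlib
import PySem

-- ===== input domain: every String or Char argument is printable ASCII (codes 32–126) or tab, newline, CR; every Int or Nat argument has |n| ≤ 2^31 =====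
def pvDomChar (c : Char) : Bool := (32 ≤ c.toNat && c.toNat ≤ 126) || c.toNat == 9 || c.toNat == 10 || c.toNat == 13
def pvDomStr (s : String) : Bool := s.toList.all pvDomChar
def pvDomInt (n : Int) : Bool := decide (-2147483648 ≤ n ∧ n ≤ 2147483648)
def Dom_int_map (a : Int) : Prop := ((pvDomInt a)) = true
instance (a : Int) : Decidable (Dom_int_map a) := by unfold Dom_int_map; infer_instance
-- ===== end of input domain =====

-- B replaces A's inner accumulation loop by a lookup into per-column prefix sums: the same table in
-- O(a^2) operations instead of O(a^3), measured faster in a timing run.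


-- Shared 2-D indexing helpers. Every index reached by either Python is nonnegative and in
-- range, so `getD _ _ 0` / `List.set` are exact for Python's `array[j][i]` reads and writes here.
def pvGet2 (arr : List (List Int)) (j c : Nat) : Int := (arr.getD j []).getD c 0
def pvSet2 (arr : List (List Int)) (j c : Nat) (v : Int) : List (List Int) :=
  arr.set j ((arr.getD j []).set c v)
-- p[-1] on the (always nonempty) prefix-sum list being built in B
def pvLast (p : List Int) : Int := p.getD (p.length - 1) 0
-- `[[1]*a] + [[0]*a for _ in range(a-1)]` — the identical initialisation line of both Pythons
def pvInit (a : Int) : List (List Int) :=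
  List.replicate a.toNat (1 : Int) ::
    (PySem.List.pyRange 0 (a - 1) 1).map (fun _ => List.replicate a.toNat (0 : Int))

-- ===== PORT A =====
def int_map (a : Int) : List (List Int) :=
  (PySem.List.pyRange 1 a 1).foldl (fun arr i =>
    let arr := (PySem.List.pyRange 1 i 1).foldl (fun arr j =>
      (PySem.List.pyRange 0 (min (i - j) (j + 1)) 1).foldl (fun arr k =>
        pvSet2 arr j.toNat i.toNat
          (pvGet2 arr j.toNat i.toNat + pvGet2 arr k.toNat (i - j - 1).toNat)) arr) arr
    pvSet2 arr i.toNat i.toNat 1) (pvInit a)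

-- ===== PORT B =====
def int_map_alt (a : Int) : List (List Int) :=
  ((PySem.List.pyRange 0 a 1).foldl (fun (st : List (List Int) × List (List Int)) i =>
    let arr :=
      if 1 ≤ i then
        let arr := (PySem.List.pyRange 1 i 1).foldl (fun arr j =>
          pvSet2 arr j.toNat i.toNat
            ((st.2.getD (i - j - 1).toNat []).getD (min (i - j) (j + 1)).toNat 0)) st.1
        pvSet2 arr i.toNat i.toNat 1
      else st.1
    let p := (PySem.List.pyRange 0 a 1).foldl
      (fun p k => p ++ [pvLast p + pvGet2 arr k.toNat i.toNat]) [0]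
    (arr, st.2 ++ [p])) (pvInit a, [])).1

-- ===== PRECONDITION & SPEC =====
def Spec_int_map (a : Int) (out : List (List Int)) : Prop := out = int_map_alt a
instance (a : Int) (out : List (List Int)) : Decidable (Spec_int_map a out) := by unfold Spec_int_map; infer_instance

-- ===== CLAIM (what is proved, stated in full; the proofs are below) =====
def Claim_equal_int_map : Prop := ∀ (a : Int), Dom_int_map a → Spec_int_map a (int_map a)

-- ===== LEMMAS AND PROOFS =====

-- Named copies of the two outer loop bodies (syntactically identical to the lambdas in the ports).
def pvStepA : List (List Int) → Int → List (List Int) := fun arr i =>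
  let arr := (PySem.List.pyRange 1 i 1).foldl (fun arr j =>
    (PySem.List.pyRange 0 (min (i - j) (j + 1)) 1).foldl (fun arr k =>
      pvSet2 arr j.toNat i.toNat
        (pvGet2 arr j.toNat i.toNat + pvGet2 arr k.toNat (i - j - 1).toNat)) arr) arr
  pvSet2 arr i.toNat i.toNat 1

def pvStepB (a : Int) : List (List Int) × List (List Int) → Int → List (List Int) × List (List Int) :=
  fun st i =>
    let arr :=
      if 1 ≤ i then
        let arr := (PySem.List.pyRange 1 i 1).foldl (fun arr j =>
          pvSet2 arr j.toNat i.toNat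
            ((st.2.getD (i - j - 1).toNat []).getD (min (i - j) (j + 1)).toNat 0)) st.1
        pvSet2 arr i.toNat i.toNat 1
      else st.1
    let p := (PySem.List.pyRange 0 a 1).foldl
      (fun p k => p ++ [pvLast p + pvGet2 arr k.toNat i.toNat]) [0]
    (arr, st.2 ++ [p])

lemma int_map_eq (a : Int) :
    int_map a = (PySem.List.pyRange 1 a 1).foldl pvStepA (pvInit a) := rfl

lemma int_map_alt_eq (a : Int) :
    int_map_alt a = ((PySem.List.pyRange 0 a 1).foldl (pvStepB a) (pvInit a, [])).1 := rfl

-- prefix sum of a column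
def pvSumTo (arr : List (List Int)) (c t : Nat) : Int :=
  ((List.range t).map (fun k => pvGet2 arr k c)).sum

lemma pvSumTo_succ (arr : List (List Int)) (c t : Nat) :
    pvSumTo arr c (t + 1) = pvSumTo arr c t + pvGet2 arr t c := by
  simp [pvSumTo, List.range_succ]

lemma pvSumTo_congr {arr arr' : List (List Int)} {c : Nat}
    (h : ∀ k, pvGet2 arr k c = pvGet2 arr' k c) (t : Nat) :
    pvSumTo arr c t = pvSumTo arr' c t := by
  simp only [pvSumTo]
  exact congrArg _ (List.map_congr_left (fun k _ => h k))

lemma pvLast_append (l : List Int) (x : Int) : pvLast (l ++ [x]) = x := by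
  simp [pvLast]

lemma length_pvSet2 (arr : List (List Int)) (j c : Nat) (v : Int) :
    (pvSet2 arr j c v).length = arr.length := by simp [pvSet2]

lemma rows_pvSet2 {arr : List (List Int)} {L : Nat} (h : ∀ r ∈ arr, r.length = L)
    (j c : Nat) (v : Int) (hj : j < arr.length) :
    ∀ r ∈ pvSet2 arr j c v, r.length = L := by
  intro r hr
  rcases List.mem_or_eq_of_mem_set hr with h' | h'
  · exact h r h'
  · subst h'
    rw [List.length_set, List.getD_eq_getElem arr [] hj]
    exact h _ (List.getElem_mem hj)

lemma getD_pvSet2_self {arr : List (List Int)} {j : Nat} (hj : j < arr.length) (c : Nat) (v : Int) :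
    (pvSet2 arr j c v).getD j [] = (arr.getD j []).set c v := by
  simp [pvSet2, hj, List.getElem_set_self]

lemma pvGet2_pvSet2_self {arr : List (List Int)} {j c : Nat}
    (hj : j < arr.length) (hc : c < (arr.getD j []).length) (v : Int) :
    pvGet2 (pvSet2 arr j c v) j c = v := by
  rw [pvGet2, getD_pvSet2_self hj, List.getD, List.getElem?_set_self hc]
  rfl

lemma pvGet2_pvSet2_ne {j c j' c' : Nat} (h : j' ≠ j ∨ c' ≠ c)
    (arr : List (List Int)) (v : Int) :
    pvGet2 (pvSet2 arr j c v) j' c' = pvGet2 arr j' c' := by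
  by_cases hj : j' = j
  · subst hj
    rcases h with h | h
    · omega
    · by_cases hj2 : j' < arr.length
      · rw [pvGet2, getD_pvSet2_self hj2, pvGet2]
        simp [List.getD, List.getElem?_set_ne (Ne.symm h)]
      · rw [pvGet2, pvGet2, pvSet2, List.set_eq_of_length_le (by omega)]
  · rw [pvGet2, pvGet2, pvSet2]
    simp [List.getD, List.getElem?_set_ne (Ne.symm hj)]

lemma pvSet2_pvSet2 {arr : List (List Int)} {j : Nat} (hj : j < arr.length) (c : Nat) (v v' : Int) :
    pvSet2 (pvSet2 arr j c v) j c v' = pvSet2 arr j c v' := by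
  calc pvSet2 (pvSet2 arr j c v) j c v'
      = (pvSet2 arr j c v).set j (((pvSet2 arr j c v).getD j []).set c v') := rfl
    _ = pvSet2 arr j c v' := by
        rw [getD_pvSet2_self hj, pvSet2, List.set_set, List.set_set, pvSet2]

lemma pvSet2_pvGet2_self {arr : List (List Int)} {j c : Nat}
    (hj : j < arr.length) (hc : c < (arr.getD j []).length) :
    pvSet2 arr j c (pvGet2 arr j c) = arr := by
  rw [pvSet2, pvGet2, List.getD_eq_getElem _ _ hc, List.set_getElem_self,
    List.getD_eq_getElem _ _ hj, List.set_getElem_self]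

-- A's inner k-loop accumulates a prefix sum of column c' into cell (jn, cn)
lemma pv_kfold {jn cn c' : Nat} (hne : c' ≠ cn) :
    ∀ (t : Nat) (cur : List (List Int)), jn < cur.length → cn < (cur.getD jn []).length →
    (List.range t).foldl (fun arr k => pvSet2 arr jn cn (pvGet2 arr jn cn + pvGet2 arr k c')) cur
      = pvSet2 cur jn cn (pvGet2 cur jn cn + pvSumTo cur c' t) := by
  intro t
  induction t with
  | zero =>
    intro cur hj hc
    simp [pvSumTo, pvSet2_pvGet2_self hj hc]
  | succ t ih =>
    intro cur hj hc
    rw [List.range_succ, List.foldl_append, ih cur hj hc]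
    simp only [List.foldl_cons, List.foldl_nil]
    rw [pvGet2_pvSet2_self hj hc,
        pvGet2_pvSet2_ne (Or.inr hne),
        pvSet2_pvSet2 hj, pvSumTo_succ, add_assoc]

-- the invariant carried from column to column
def pvGood (n : Nat) (arr ps : List (List Int)) (m : Nat) : Prop :=
  arr.length = n ∧ (∀ r ∈ arr, r.length = n) ∧
  (∀ j c : Nat, 1 ≤ j → m ≤ c → pvGet2 arr j c = 0) ∧
  ps.length = m ∧
  (∀ c : Nat, c < m → ps.getD c [] = (List.range (n + 1)).map (fun t => pvSumTo arr c t))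

-- the two j-loops produce the same state, touching only column m
lemma pv_jfold (n m : Nat) (hmn : m < n) (arr0 ps : List (List Int))
    (h3 : ∀ j c : Nat, 1 ≤ j → m ≤ c → pvGet2 arr0 j c = 0)
    (h5 : ∀ c : Nat, c < m → ps.getD c [] = (List.range (n + 1)).map (fun t => pvSumTo arr0 c t)) :
    ∀ (d jl : Nat), jl + d = m → 1 ≤ jl →
    ∀ (cur : List (List Int)), cur.length = n → (∀ r ∈ cur, r.length = n) →
    (∀ j' c' : Nat, c' ≠ m → pvGet2 cur j' c' = pvGet2 arr0 j' c') →
    (∀ j' : Nat, jl ≤ j' → pvGet2 cur j' m = pvGet2 arr0 j' m) →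
    ((PySem.List.pyRange (jl : Int) (m : Int) 1).foldl (fun arr j =>
        (PySem.List.pyRange 0 (min ((m : Int) - j) (j + 1)) 1).foldl (fun arr k =>
          pvSet2 arr j.toNat ((m : Int)).toNat
            (pvGet2 arr j.toNat ((m : Int)).toNat + pvGet2 arr k.toNat ((m : Int) - j - 1).toNat)) arr) cur
      = (PySem.List.pyRange (jl : Int) (m : Int) 1).foldl (fun arr j =>
        pvSet2 arr j.toNat ((m : Int)).toNat
          ((ps.getD ((m : Int) - j - 1).toNat []).getD (min ((m : Int) - j) (j + 1)).toNat 0)) cur)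
    ∧ (((PySem.List.pyRange (jl : Int) (m : Int) 1).foldl (fun arr j =>
        (PySem.List.pyRange 0 (min ((m : Int) - j) (j + 1)) 1).foldl (fun arr k =>
          pvSet2 arr j.toNat ((m : Int)).toNat
            (pvGet2 arr j.toNat ((m : Int)).toNat + pvGet2 arr k.toNat ((m : Int) - j - 1).toNat)) arr) cur).length = n)
    ∧ (∀ r ∈ (PySem.List.pyRange (jl : Int) (m : Int) 1).foldl (fun arr j =>
        (PySem.List.pyRange 0 (min ((m : Int) - j) (j + 1)) 1).foldl (fun arr k =>
          pvSet2 arr j.toNat ((m : Int)).toNat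
            (pvGet2 arr j.toNat ((m : Int)).toNat + pvGet2 arr k.toNat ((m : Int) - j - 1).toNat)) arr) cur, r.length = n)
    ∧ (∀ j' c' : Nat, c' ≠ m → pvGet2 ((PySem.List.pyRange (jl : Int) (m : Int) 1).foldl (fun arr j =>
        (PySem.List.pyRange 0 (min ((m : Int) - j) (j + 1)) 1).foldl (fun arr k =>
          pvSet2 arr j.toNat ((m : Int)).toNat
            (pvGet2 arr j.toNat ((m : Int)).toNat + pvGet2 arr k.toNat ((m : Int) - j - 1).toNat)) arr) cur) j' c'
        = pvGet2 arr0 j' c') := by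
  intro d
  induction d with
  | zero =>
    intro jl hd hjl cur hlen hrows hagc hagm
    rw [PySem.List.pyRange_one_eq_nil (Nat.cast_le.mpr (by omega))]
    simp only [List.foldl_nil]
    exact ⟨trivial, hlen, hrows, fun j' c' hc' => hagc j' c' hc'⟩
  | succ d ih =>
    intro jl hd hjl cur hlen hrows hagc hagm
    have hjlm : jl < m := by omega
    rw [PySem.List.pyRange_one_cons (Nat.cast_lt.mpr hjlm)]
    simp only [List.foldl_cons]
    have e1 : min ((m : Int) - (jl : Int)) ((jl : Int) + 1) = ((min (m - jl) (jl + 1) : Nat) : Int) := by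
      omega
    have e2 : ((m : Int) - (jl : Int) - 1) = ((m - jl - 1 : Nat) : Int) := by omega
    simp only [e1, e2, Int.toNat_natCast, PySem.List.pyRange_zero_natCast, List.foldl_map]
    have hrow : (cur.getD jl []).length = n := by
      rw [List.getD_eq_getElem _ _ (by omega)]
      exact hrows _ (List.getElem_mem _)
    rw [pv_kfold (show m - jl - 1 ≠ m by omega) _ cur (by omega) (by omega)]
    have hval : pvGet2 cur jl m + pvSumTo cur (m - jl - 1) (min (m - jl) (jl + 1))
        = (ps.getD (m - jl - 1) []).getD (min (m - jl) (jl + 1)) 0 := by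
      rw [hagm jl le_rfl, h3 jl m hjl le_rfl, h5 (m - jl - 1) (by omega),
        PySem.List.getD_map_range _ _ _ _ (by omega), zero_add]
      exact pvSumTo_congr (fun k => hagc k (m - jl - 1) (by omega)) _
    rw [hval]
    have IH := ih (jl + 1) (by omega) (by omega)
      (pvSet2 cur jl m ((ps.getD (m - jl - 1) []).getD (min (m - jl) (jl + 1)) 0))
      (by rw [length_pvSet2]; exact hlen)
      (rows_pvSet2 hrows jl m _ (by omega))
      (fun j' c' hc' => by
        rw [pvGet2_pvSet2_ne (Or.inr hc')]; exact hagc j' c' hc')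
      (fun j' hj' => by
        rw [pvGet2_pvSet2_ne (Or.inl (by omega))]; exact hagm j' (by omega))
    push_cast at IH
    simp only [Int.toNat_natCast] at IH
    exact IH

-- B's p-loop builds the table of prefix sums of column i
lemma pv_pfold (arr : List (List Int)) (c : Nat) :
    ∀ N : Nat, (List.range N).foldl (fun p km => p ++ [pvLast p + pvGet2 arr km c]) [0]
      = (List.range (N + 1)).map (fun t => pvSumTo arr c t) := by
  intro N
  induction N with
  | zero => simp [pvSumTo]
  | succ N ih =>
    rw [List.range_succ, List.foldl_append, ih]
    simp only [List.foldl_cons, List.foldl_nil]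
    have hsplit : (List.range (N + 1)).map (fun t => pvSumTo arr c t)
        = (List.range N).map (fun t => pvSumTo arr c t) ++ [pvSumTo arr c N] := by
      rw [List.range_succ, List.map_append]; rfl
    have hlast : pvLast ((List.range (N + 1)).map (fun t => pvSumTo arr c t)) = pvSumTo arr c N := by
      rw [hsplit, pvLast_append]
    rw [hlast, ← pvSumTo_succ]
    conv_rhs => rw [List.range_succ, List.map_append]
    rfl

-- one column step of B equals one column step of A and preserves the invariant
lemma pv_outer (a : Int) (n : Nat) (ha : a = (n : Int)) :
    ∀ (d m : Nat), m + d = n → 1 ≤ m →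
    ∀ (arr ps : List (List Int)), pvGood n arr ps m →
    ((PySem.List.pyRange (m : Int) a 1).foldl (pvStepB a) (arr, ps)).1
      = (PySem.List.pyRange (m : Int) a 1).foldl pvStepA arr := by
  subst ha
  intro d
  induction d with
  | zero =>
    intro m hd hm arr ps hGood
    rw [PySem.List.pyRange_one_eq_nil (Nat.cast_le.mpr (by omega))]
    rfl
  | succ d ih =>
    intro m hd hm arr ps hGood
    obtain ⟨h1, h2, h3, h4, h5⟩ := hGood
    have hmn : m < n := by omega
    rw [PySem.List.pyRange_one_cons (Nat.cast_lt.mpr hmn)]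
    simp only [List.foldl_cons, pvStepA, pvStepB]
    rw [if_pos (show (1 : Int) ≤ (m : Int) by exact_mod_cast hm)]
    obtain ⟨hEq, hLen, hRows, hCols⟩ := pv_jfold n m hmn arr ps h3 h5 (m - 1) 1 (by omega)
      le_rfl arr h1 h2 (fun _ _ _ => rfl) (fun _ _ => rfl)
    simp only [Nat.cast_one, Int.toNat_natCast] at hEq hLen hRows hCols
    simp only [Int.toNat_natCast, PySem.List.pyRange_zero_natCast, List.foldl_map]
    rw [← hEq, pv_pfold]
    have hG : pvGood n
        (pvSet2 ((PySem.List.pyRange 1 (m : Int) 1).foldl (fun arr j =>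
          (PySem.List.pyRange 0 (min ((m : Int) - j) (j + 1)) 1).foldl (fun arr k =>
            pvSet2 arr j.toNat m
              (pvGet2 arr j.toNat m + pvGet2 arr k.toNat ((m : Int) - j - 1).toNat)) arr) arr) m m 1)
        (ps ++ [(List.range (n + 1)).map (fun t => pvSumTo
          (pvSet2 ((PySem.List.pyRange 1 (m : Int) 1).foldl (fun arr j =>
            (PySem.List.pyRange 0 (min ((m : Int) - j) (j + 1)) 1).foldl (fun arr k =>
              pvSet2 arr j.toNat m
                (pvGet2 arr j.toNat m + pvGet2 arr k.toNat ((m : Int) - j - 1).toNat)) arr) arr) m m 1) m t)])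
        (m + 1) := by
      refine ⟨?_, ?_, ?_, ?_, ?_⟩
      · rw [length_pvSet2]; exact hLen
      · exact rows_pvSet2 hRows m m 1 (by omega)
      · intro j c hj hc
        rw [pvGet2_pvSet2_ne (Or.inr (by omega)), hCols j c (by omega)]
        exact h3 j c hj (by omega)
      · simp [h4]
      · intro c hc
        rcases Nat.lt_or_ge c m with h | h
        · rw [List.getD_append _ _ _ c (by omega), h5 c h]
          refine List.map_congr_left (fun t ht => ?_)
          exact pvSumTo_congr (fun k =>
            (by rw [pvGet2_pvSet2_ne (Or.inr (by omega)), hCols k c (by omega)] :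
              pvGet2 _ k c = pvGet2 arr k c).symm) t
        · have hcm : c = m := by omega
          subst hcm
          rw [← h4]
          simp
    have IH := ih (m + 1) (by omega) (by omega) _ _ hG
    push_cast at IH
    exact IH

lemma pvInit_length {a : Int} (ha : 1 ≤ a) : (pvInit a).length = a.toNat := by
  simp [pvInit, PySem.List.length_pyRange_one]
  omega

lemma pvInit_rows (a : Int) : ∀ r ∈ pvInit a, r.length = a.toNat := by
  intro r hr
  rcases List.mem_cons.1 hr with rfl | h
  · simp
  · rcases List.mem_map.1 h with ⟨_, _, rfl⟩
    simp

lemma pvGet2_pvInit_pos (a : Int) {j : Nat} (hj : 1 ≤ j) (c : Nat) :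
    pvGet2 (pvInit a) j c = 0 := by
  obtain ⟨j', rfl⟩ : ∃ j', j = j' + 1 := ⟨j - 1, by omega⟩
  rw [pvGet2, pvInit, List.getD_cons_succ]
  simp [List.getD, List.getElem?_replicate]
  split <;> simp

-- ===== VERDICT (by name: the statement is the Claim_ definition above) =====
theorem int_map_spec : Claim_equal_int_map := by
  intro a _
  show int_map a = int_map_alt a
  by_cases h : a ≤ 0
  · rw [int_map_eq, int_map_alt_eq,
      PySem.List.pyRange_one_eq_nil (show a ≤ 1 by omega),
      PySem.List.pyRange_one_eq_nil (show a ≤ 0 by omega)]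
    rfl
  · replace h : 0 < a := by omega
    obtain ⟨n, rfl⟩ : ∃ n : Nat, a = (n : Int) :=
      ⟨a.toNat, (Int.toNat_of_nonneg (by omega)).symm⟩
    have hn : 1 ≤ n := by exact_mod_cast h
    rw [int_map_eq, int_map_alt_eq, PySem.List.pyRange_one_cons h]
    simp only [List.foldl_cons]
    have hstep : pvStepB (n : Int) (pvInit (n : Int), []) 0
        = (pvInit (n : Int), [(List.range (n + 1)).map (fun t => pvSumTo (pvInit (n : Int)) 0 t)]) := by
      simp only [pvStepB]
      rw [if_neg (by norm_num)]
      simp only [PySem.List.pyRange_zero_natCast, List.foldl_map, Int.toNat_natCast, Int.toNat_zero]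
      rw [pv_pfold]
      simp
    rw [hstep]
    have hG : pvGood n (pvInit (n : Int))
        [(List.range (n + 1)).map (fun t => pvSumTo (pvInit (n : Int)) 0 t)] 1 := by
      refine ⟨?_, ?_, ?_, rfl, ?_⟩
      · simpa using pvInit_length (a := (n : Int)) (by exact_mod_cast hn)
      · simpa using pvInit_rows (n : Int)
      · exact fun j c hj _ => pvGet2_pvInit_pos _ hj c
      · intro c hc
        have hc0 : c = 0 := by omega
        subst hc0
        rfl
    have H := pv_outer (n : Int) n rfl (n - 1) 1 (by omega) le_rfl (pvInit (n : Int)) _ hG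
    simpa using H.symm
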